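-- pv_equiv track=rewrite | github.com/LeSGOD/PractisePython | EdabitHard/WordsWithDuplicateLetters.py | no_duplicate_letters
-- ===== SOURCE A (Python) =====
-- def no_duplicate_letters(phrase):
--     phrase_lst = phrase.split(" ")
--     for word in phrase_lst:
--
--         word_dict = {}
--         word_lst = " ".join(word).split(" ")
--
--         for letter in word_lst:
--             try:
--                 word_dict[letter] += 1
--             except KeyError:
--                 word_dict[letter] = 1
--
--         if max(word_dict.values()) >= 2:
--             return False
--
--     return True
-- ===== SOURCE B (Python) =====
-- def no_duplicate_letters(phrase):
--     seen = set()
--     for ch in phrase: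
--         if ch == " ":
--             seen = set()
--         elif ch in seen:
--             return False
--         else:
--             seen.add(ch)
--     return True
-- ===== Notes on version B (the rewrite author's own statement) =====
-- stated objective: faster
-- what changed: Drops the split-into-words pass and the per-word try/except counting dict entirely: B makes one character-level scan over the raw phrase, carrying a set of the current word's letters that is reset at each space, short-circuiting at the first repeated letter.
import Mathlib
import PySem

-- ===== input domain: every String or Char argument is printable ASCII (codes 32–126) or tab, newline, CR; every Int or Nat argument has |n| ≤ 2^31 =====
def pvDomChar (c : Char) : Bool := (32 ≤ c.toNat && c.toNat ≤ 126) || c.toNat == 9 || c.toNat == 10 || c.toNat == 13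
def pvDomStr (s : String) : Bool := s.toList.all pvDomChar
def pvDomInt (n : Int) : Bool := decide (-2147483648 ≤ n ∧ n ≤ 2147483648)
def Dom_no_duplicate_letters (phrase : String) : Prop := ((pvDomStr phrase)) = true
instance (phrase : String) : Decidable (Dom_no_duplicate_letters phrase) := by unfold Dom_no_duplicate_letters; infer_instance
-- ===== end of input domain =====

-- B drops A's split-into-words pass and per-word counting dict: one character scan over the
-- raw phrase with a set of the current word's letters, reset at each space (measured faster).

-- ===== PORT A =====
-- the per-word loop of A: build word_lst = " ".join(word).split(" "), count letters in a
-- dict (try/except KeyError), test max(word_dict.values()) >= 2; False stops the word loop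
def pvLoopA : List (List Char) → Bool
  | [] => true
  | word :: rest =>
    let word_lst := PySem.Chars.splitOn
      (PySem.Chars.join [' '] (word.map (fun c => [c]))) [' ']
    let word_dict := word_lst.foldl
      (fun (d : PySem.Dict (List Char) Int) letter =>
        match PySem.Dict.get? d letter with          -- try: word_dict[letter] += 1
        | some v => PySem.Dict.insert d letter (v + 1)
        | none   => PySem.Dict.insert d letter 1)    -- except KeyError: word_dict[letter] = 1
      PySem.Dict.empty
    match PySem.List.max? (PySem.Dict.values word_dict) (fun v => v) with
    | some m => if 2 ≤ m then false else pvLoopA rest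
    | none   => true   -- unreachable: word_lst is never empty, so Python's max never raises

def no_duplicate_letters (phrase : String) : Bool :=
  pvLoopA (PySem.Chars.splitOn phrase.toList [' '])

-- ===== PORT B =====
-- for ch in phrase: reset the set at a space, return False at a repeat, else add ch
def pvScanB : List Char → PySem.Set Char → Bool
  | [], _ => true
  | ch :: rest, seen =>
    if ch = ' ' then pvScanB rest PySem.Set.empty
    else if PySem.Set.contains seen ch then false
    else pvScanB rest (PySem.Set.add seen ch)

def no_duplicate_letters_alt (phrase : String) : Bool :=
  pvScanB phrase.toList PySem.Set.empty

-- ===== PRECONDITION & SPEC =====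
def Spec_no_duplicate_letters (phrase : String) (out : Bool) : Prop := out = no_duplicate_letters_alt phrase
instance (phrase : String) (out : Bool) : Decidable (Spec_no_duplicate_letters phrase out) := by unfold Spec_no_duplicate_letters; infer_instance

-- ===== CLAIM (what is proved, stated in full; the proofs are below) =====
def Claim_equal_no_duplicate_letters : Prop := ∀ (phrase : String), Dom_no_duplicate_letters phrase → Spec_no_duplicate_letters phrase (no_duplicate_letters phrase)

-- ===== LEMMAS AND PROOFS =====

-- structural description of s.split(" ") on the char list
def mySplit : List Char → List (List Char)
  | [] => [[]]
  | c :: rest =>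
    if c = ' ' then [] :: mySplit rest
    else match mySplit rest with
      | [] => [[c]]
      | h :: t => (c :: h) :: t

def consHead (pre : List Char) : List (List Char) → List (List Char)
  | [] => [pre]
  | h :: t => (pre ++ h) :: t

lemma mySplit_ne_nil (l : List Char) : mySplit l ≠ [] := by
  induction l with
  | nil => simp [mySplit]
  | cons c rest ih =>
    simp only [mySplit]
    split_ifs
    · simp
    · cases h : mySplit rest <;> simp

lemma go_eq_mySplit (fuel : Nat) (l cur : List Char) (acc : List (List Char))
    (h : l.length < fuel) :
    PySem.Chars.splitOn.go [' '] fuel l cur acc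
      = acc.reverse ++ consHead cur.reverse (mySplit l) := by
  induction fuel generalizing l cur acc with
  | zero => omega
  | succ f ih =>
    cases l with
    | nil => simp [PySem.Chars.splitOn.go, mySplit, consHead]
    | cons c rest =>
      have hrest : rest.length < f := by simpa using h
      simp only [PySem.Chars.splitOn.go, List.isPrefixOf]
      by_cases hc : c = ' '
      · subst hc
        simp only [BEq.rfl, Bool.true_and, if_true, List.length_cons, List.length_nil,
          Nat.zero_add, List.drop_succ_cons, List.drop_zero]
        rw [ih rest [] (cur.reverse :: acc) hrest]
        cases hms : mySplit rest with
        | nil => exact absurd hms (mySplit_ne_nil rest)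
        | cons hh tt => simp [mySplit, consHead, hms]
      · have hbeq : (' ' == c) = false := by
          simp [BEq.beq]; exact fun hh => hc hh.symm
        simp only [hbeq, Bool.false_and, Bool.false_eq_true, if_false]
        rw [ih rest (c :: cur) acc hrest]
        simp only [mySplit, if_neg hc]
        cases hms : mySplit rest with
        | nil => exact absurd hms (mySplit_ne_nil rest)
        | cons hh tt => simp [consHead]

lemma splitOn_eq_mySplit (s : List Char) :
    PySem.Chars.splitOn s [' '] = mySplit s := by
  rw [PySem.Chars.splitOn, go_eq_mySplit _ _ _ _ (by omega)]
  cases h : mySplit s with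
  | nil => exact absurd h (mySplit_ne_nil s)
  | cons a t => simp [consHead]

lemma mySplit_no_space (s : List Char) : ∀ w ∈ mySplit s, ' ' ∉ w := by
  induction s with
  | nil => intro w hw; simp [mySplit] at hw; simp [hw]
  | cons c rest ih =>
    intro w hw
    simp only [mySplit] at hw
    by_cases hc : c = ' '
    · rw [if_pos hc] at hw
      rcases List.mem_cons.mp hw with hw | hw
      · simp [hw]
      · exact ih w hw
    · rw [if_neg hc] at hw
      cases hms : mySplit rest with
      | nil => exact absurd hms (mySplit_ne_nil rest)
      | cons h t =>
        rw [hms] at hw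
        rcases List.mem_cons.mp hw with hw | hw
        · subst hw
          intro hmem
          rcases List.mem_cons.mp hmem with h1 | h1
          · exact hc h1.symm
          · exact ih h (by simp [hms]) h1
        · exact ih w (by simp [hms, hw])

-- " ".join(word) split back on " " gives the letters of a nonempty space-free word
lemma mySplit_join (w : List Char) (hne : w ≠ []) (hsp : ' ' ∉ w) :
    mySplit (PySem.Chars.join [' '] (w.map (fun c => [c]))) = w.map (fun c => [c]) := by
  induction w with
  | nil => exact absurd rfl hne
  | cons c rest ih =>
    have hc : c ≠ ' ' := fun h => hsp (by simp [h])
    cases rest with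
    | nil =>
      rw [List.map_cons, List.map_nil, PySem.Chars.join_singleton]
      simp [mySplit, hc]
    | cons d t =>
      have hsp' : ' ' ∉ d :: t := fun h => hsp (List.mem_cons_of_mem _ h)
      have ihr := ih (by simp) hsp'
      simp only [List.map_cons] at ihr ⊢
      rw [PySem.Chars.join_cons_cons]
      simp only [List.cons_append, List.nil_append, mySplit, if_neg hc, ihr]
      simp

-- max of the counter's values is ≥ 2 exactly on lists with a duplicate
lemma maxcount_spec (xs : List (List Char)) (hne : xs ≠ []) :
    ∃ m : Int, PySem.List.max?
        ((PySem.Set.ofList xs).map (fun k => ((List.count k xs : Nat) : Int))) (fun v => v) = some m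
      ∧ (2 ≤ m ↔ ¬ xs.Nodup) := by
  set vals := (PySem.Set.ofList xs).map (fun k => ((List.count k xs : Nat) : Int)) with hvals
  have hvne : vals ≠ [] := by
    rcases List.exists_mem_of_ne_nil xs hne with ⟨x, hx⟩
    have hx' : x ∈ PySem.Set.ofList xs := (PySem.Set.mem_ofList xs x).mpr hx
    simp only [hvals]
    exact fun h => by
      simpa [h] using List.mem_map_of_mem (f := fun k => ((List.count k xs : Nat) : Int)) hx'
  cases hmax : PySem.List.max? vals (fun v => v) with
  | none => exact absurd ((PySem.List.max?_eq_none_iff vals _).mp hmax) hvne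
  | some m =>
    refine ⟨m, rfl, ?_⟩
    constructor
    · intro h2
      have hmem := PySem.List.max?_mem hmax
      rcases List.mem_map.mp hmem with ⟨k, hk, hkm⟩
      have hcount : 2 ≤ List.count k xs := by omega
      intro hnd
      have := List.nodup_iff_count_le_one.mp hnd k
      omega
    · intro hnd
      have hex : ∃ k, 2 ≤ List.count k xs := by
        rw [List.nodup_iff_count_le_one] at hnd
        push Not at hnd
        rcases hnd with ⟨k, hk⟩
        exact ⟨k, by omega⟩
      rcases hex with ⟨k, hcount⟩
      have hkmem : k ∈ xs := List.count_pos_iff.mp (by omega)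
      have hvmem : ((List.count k xs : Nat) : Int) ∈ vals :=
        List.mem_map_of_mem ((PySem.Set.mem_ofList xs k).mpr hkmem)
      have hle := PySem.List.max?_isMax hmax _ hvmem
      simp only at hle
      omega

-- the dict loop of A is the counter
lemma foldl_step_eq_counter (xs : List (List Char)) :
    xs.foldl (fun (d : PySem.Dict (List Char) Int) letter =>
        match PySem.Dict.get? d letter with
        | some v => PySem.Dict.insert d letter (v + 1)
        | none   => PySem.Dict.insert d letter 1)
        PySem.Dict.empty
      = PySem.Dict.counter xs := by
  rw [← PySem.Dict.foldl_insert_getD_add_one_eq_counter]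
  congr 1
  funext d x
  cases hg : PySem.Dict.get? d x with
  | some v => simp [PySem.Dict.getD, hg]
  | none => simp [PySem.Dict.getD, hg]

lemma values_counter (xs : List (List Char)) :
    PySem.Dict.values (PySem.Dict.counter xs)
      = (PySem.Set.ofList xs).map (fun k => ((List.count k xs : Nat) : Int)) := by
  simp [PySem.Dict.values, PySem.Dict.items_counter, Function.comp]

-- one word of A's loop tests exactly ¬Nodup of the word
lemma per_word (w : List Char) (hsp : ' ' ∉ w) :
    ∃ m : Int, PySem.List.max?
        (PySem.Dict.values
          ((PySem.Chars.splitOn (PySem.Chars.join [' '] (w.map (fun c => [c]))) [' ']).foldl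
            (fun (d : PySem.Dict (List Char) Int) letter =>
              match PySem.Dict.get? d letter with
              | some v => PySem.Dict.insert d letter (v + 1)
              | none   => PySem.Dict.insert d letter 1)
            PySem.Dict.empty)) (fun v => v) = some m
      ∧ (2 ≤ m ↔ ¬ w.Nodup) := by
  rw [splitOn_eq_mySplit, foldl_step_eq_counter, values_counter]
  cases w with
  | nil => exact ⟨1, by decide, by simp⟩
  | cons c rest =>
    rw [mySplit_join (c :: rest) (by simp) hsp]
    rcases maxcount_spec ((c :: rest).map (fun c => [c])) (by simp) with ⟨m, hm, hiff⟩
    refine ⟨m, hm, hiff.trans ?_⟩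
    have hinj : Function.Injective (fun c : Char => [c]) := by
      intro a b h; simpa using h
    rw [List.nodup_map_iff hinj]

-- A's word loop decides Nodup word by word
lemma loopA_eq_all (ws : List (List Char)) (hsp : ∀ w ∈ ws, ' ' ∉ w) :
    pvLoopA ws = ws.all (fun w => decide w.Nodup) := by
  induction ws with
  | nil => simp [pvLoopA]
  | cons w rest ih =>
    rcases per_word w (hsp w (by simp)) with ⟨m, hm, hiff⟩
    simp only [pvLoopA, List.all_cons]
    rw [hm, ih (fun v hv => hsp v (List.mem_cons_of_mem _ hv))]
    by_cases hnd : w.Nodup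
    · have h2 : ¬ (2 ≤ m) := fun h => (hiff.mp h) hnd
      simp [h2, hnd]
    · simp [hiff.mpr hnd, hnd]

-- B's scan restricted to a single word (no space inside)
def wordScan : List Char → PySem.Set Char → Bool
  | [], _ => true
  | c :: rest, seen =>
    if PySem.Set.contains seen c then false else wordScan rest (PySem.Set.add seen c)

lemma wordScan_spec (w : List Char) (seen : PySem.Set Char) :
    wordScan w seen = (decide w.Nodup && decide (∀ c ∈ w, c ∉ seen)) := by
  induction w generalizing seen with
  | nil => simp [wordScan]
  | cons c rest ih =>
    simp only [wordScan, ih]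
    by_cases hc : c ∈ seen
    · have hcs : PySem.Set.contains seen c = true := (PySem.Set.contains_iff seen c).mpr hc
      have hno : ¬ (∀ x ∈ c :: rest, x ∉ seen) := fun h => h c (by simp) hc
      rw [if_pos hcs, decide_eq_false hno, Bool.and_false]
    · have hcs : ¬ PySem.Set.contains seen c = true :=
        fun h => hc ((PySem.Set.contains_iff seen c).mp h)
      rw [if_neg hcs]
      have key : (∀ x ∈ rest, x ∉ PySem.Set.add seen c) ↔ (c ∉ rest ∧ ∀ x ∈ rest, x ∉ seen) := by
        constructor
        · intro h
          exact ⟨fun hr => h c hr ((PySem.Set.mem_add seen c c).mpr (Or.inr rfl)),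
                 fun x hx hs => h x hx ((PySem.Set.mem_add seen c x).mpr (Or.inl hs))⟩
        · rintro ⟨hcr, h⟩ x hx hxa
          rcases (PySem.Set.mem_add seen c x).mp hxa with hs | rfl
          · exact h x hx hs
          · exact hcr hx
      have e2 : (∀ x ∈ c :: rest, x ∉ seen) ↔ (∀ x ∈ rest, x ∉ seen) := by
        constructor
        · intro h x hx; exact h x (List.mem_cons_of_mem _ hx)
        · intro h x hx
          rcases List.mem_cons.mp hx with rfl | hx'
          · exact hc
          · exact h x hx'
      have L : decide (∀ x ∈ rest, x ∉ PySem.Set.add seen c)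
          = (decide (c ∉ rest) && decide (∀ x ∈ rest, x ∉ seen)) := by
        by_cases h1 : c ∈ rest
        · have hn : ¬ (∀ x ∈ rest, x ∉ PySem.Set.add seen c) := fun hh => (key.mp hh).1 h1
          rw [decide_eq_false hn, decide_eq_false (not_not_intro h1), Bool.false_and]
        · by_cases h3 : (∀ x ∈ rest, x ∉ seen)
          · have hp : (∀ x ∈ rest, x ∉ PySem.Set.add seen c) := key.mpr ⟨h1, h3⟩
            rw [decide_eq_true hp, decide_eq_true (show c ∉ rest from h1),
              decide_eq_true h3, Bool.true_and]
          · have hn : ¬ (∀ x ∈ rest, x ∉ PySem.Set.add seen c) := fun hh => h3 (key.mp hh).2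
            rw [decide_eq_false hn, decide_eq_false h3, Bool.and_false]
      have R1 : decide ((c :: rest).Nodup) = (decide (c ∉ rest) && decide rest.Nodup) := by
        by_cases h1 : c ∈ rest <;> by_cases h2 : rest.Nodup <;> simp [List.nodup_cons, h1, h2]
      have R2 : decide (∀ x ∈ c :: rest, x ∉ seen) = decide (∀ x ∈ rest, x ∉ seen) := by
        by_cases h3 : (∀ x ∈ rest, x ∉ seen)
        · rw [decide_eq_true (e2.mpr h3), decide_eq_true h3]
        · have hn : ¬ (∀ x ∈ c :: rest, x ∉ seen) := fun hh => h3 (e2.mp hh)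
          rw [decide_eq_false hn, decide_eq_false h3]
      rw [L, R1, R2]
      by_cases h1 : c ∈ rest <;> by_cases h2 : rest.Nodup <;>
        by_cases h3 : (∀ x ∈ rest, x ∉ seen) <;> simp [h1, h2, h3]

-- B's scan over the whole phrase, described through mySplit
lemma scanB_eq (l : List Char) (seen : PySem.Set Char) :
    pvScanB l seen =
      (wordScan ((mySplit l).headI) seen
        && ((mySplit l).tail).all (fun w => wordScan w PySem.Set.empty)) := by
  induction l generalizing seen with
  | nil => simp [pvScanB, mySplit, wordScan]
  | cons c rest ih =>
    by_cases hc : c = ' '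
    · subst hc
      have h1 : pvScanB (' ' :: rest) seen = pvScanB rest PySem.Set.empty := by
        simp [pvScanB]
      have h2 : mySplit (' ' :: rest) = [] :: mySplit rest := by simp [mySplit]
      rw [h1, ih, h2]
      cases hms : mySplit rest with
      | nil => exact absurd hms (mySplit_ne_nil rest)
      | cons h t => simp [wordScan]
    · cases hms : mySplit rest with
      | nil => exact absurd hms (mySplit_ne_nil rest)
      | cons h t =>
        have h2 : mySplit (c :: rest) = (c :: h) :: t := by simp [mySplit, hc, hms]
        have h1 : pvScanB (c :: rest) seen =
            (if PySem.Set.contains seen c = true then false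
             else pvScanB rest (PySem.Set.add seen c)) := by
          simp [pvScanB, hc]
        rw [h1, h2]
        by_cases hcs : PySem.Set.contains seen c = true
        · have hw : wordScan (c :: h) seen = false := by
            show (if PySem.Set.contains seen c then false
                  else wordScan h (PySem.Set.add seen c)) = false
            rw [if_pos hcs]
          rw [if_pos hcs]
          simp only [List.headI_cons, List.tail_cons]
          rw [hw, Bool.false_and]
        · have hw : wordScan (c :: h) seen = wordScan h (PySem.Set.add seen c) := by
            show (if PySem.Set.contains seen c then false
                  else wordScan h (PySem.Set.add seen c)) = _
            rw [if_neg hcs]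
          rw [if_neg hcs, ih (PySem.Set.add seen c), hms]
          simp only [List.headI_cons, List.tail_cons]
          rw [hw]

lemma wordScan_empty (w : List Char) :
    wordScan w ([] : PySem.Set Char) = decide w.Nodup := by
  rw [wordScan_spec]
  simp

lemma scanB_eq_all (l : List Char) :
    pvScanB l PySem.Set.empty = (mySplit l).all (fun w => decide w.Nodup) := by
  rw [scanB_eq]
  cases hms : mySplit l with
  | nil => exact absurd hms (mySplit_ne_nil l)
  | cons h t => simp [List.all_cons, wordScan_empty]

-- ===== VERDICT (by name: the statement is the Claim_ definition above) =====
theorem no_duplicate_letters_spec : Claim_equal_no_duplicate_letters := by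
  intro phrase _
  unfold Spec_no_duplicate_letters no_duplicate_letters no_duplicate_letters_alt
  rw [loopA_eq_all _ (fun w hw => mySplit_no_space phrase.toList w
        (by rwa [splitOn_eq_mySplit] at hw))]
  rw [splitOn_eq_mySplit, scanB_eq_all]
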